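-- pv_equiv track=rewrite | github.com/ursa-mikail/terraform_architecture_diagram_draw | terraform_architecture_diagram_draw_00.py | categorize_resources
-- ===== SOURCE A (Python) =====
-- def categorize_resources(resources):
--     """Categorize resources by their function"""
--     categories = {
--         'networking': [],
--         'compute': [],
--         'database': [],
--         'security': [],
--         'storage': [],
--         'monitoring': [],
--         'integration': [],
--         'other': []
--     }
--
--     category_map = {
--         'aws_vpc': 'networking',
--         'aws_subnet': 'networking',
--         'aws_internet_gateway': 'networking',
--         'aws_nat_gateway': 'networking',
--         'aws_route_table': 'networking',
--         'aws_security_group': 'networking',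
--
--         'aws_instance': 'compute',
--         'aws_launch_template': 'compute',
--         'aws_autoscaling_group': 'compute',
--         'aws_lambda_function': 'compute',
--         'aws_ecs_service': 'compute',
--         'aws_ecs_cluster': 'compute',
--
--         'aws_lb': 'networking',
--         'aws_alb': 'networking',
--         'aws_elb': 'networking',
--         'aws_lb_target_group': 'networking',
--
--         'aws_db_instance': 'database',
--         'aws_rds_cluster': 'database',
--         'aws_dynamodb_table': 'database',
--         'aws_elasticache_cluster': 'database',
--
--         'aws_wafv2_web_acl': 'security',
--         'aws_waf_web_acl': 'security',
--         'aws_iam_role': 'security',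
--         'aws_iam_policy': 'security',
--
--         'aws_s3_bucket': 'storage',
--
--         'aws_cloudwatch_log_group': 'monitoring',
--
--         'aws_sqs_queue': 'integration',
--         'aws_sns_topic': 'integration',
--     }
--
--     for resource in resources:
--         category = category_map.get(resource['type'], 'other')
--         categories[category].append(resource)
--
--     return categories
-- ===== SOURCE B (Python) =====
-- def categorize_resources(resources):
--     """Categorize resources by their function"""
--     TYPES = [
--         ('networking', ('aws_vpc', 'aws_subnet', 'aws_internet_gateway',
--                         'aws_nat_gateway', 'aws_route_table', 'aws_security_group',
--                         'aws_lb', 'aws_alb', 'aws_elb', 'aws_lb_target_group')),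
--         ('compute', ('aws_instance', 'aws_launch_template', 'aws_autoscaling_group',
--                      'aws_lambda_function', 'aws_ecs_service', 'aws_ecs_cluster')),
--         ('database', ('aws_db_instance', 'aws_rds_cluster', 'aws_dynamodb_table',
--                       'aws_elasticache_cluster')),
--         ('security', ('aws_wafv2_web_acl', 'aws_waf_web_acl', 'aws_iam_role',
--                       'aws_iam_policy')),
--         ('storage', ('aws_s3_bucket',)),
--         ('monitoring', ('aws_cloudwatch_log_group',)),
--         ('integration', ('aws_sqs_queue', 'aws_sns_topic')),
--     ]
--
--     def classify(t):
--         for cat, types in TYPES: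
--             if t in types:
--                 return cat
--         return 'other'
--
--     items = list(resources)  # materialize once so a one-shot iterator still works
--     result = {cat: [r for r in items if classify(r['type']) == cat]
--               for cat, _ in TYPES}
--     result['other'] = [r for r in items if classify(r['type']) == 'other']
--     return result
-- ===== Notes on version B (the rewrite author's own statement) =====
-- stated objective: alternative
-- what changed: Replaces A's single-pass dict-dispatch loop (category_map lookup appending into pre-built mutable buckets) with per-category type tuples, a first-match linear classifier over them, and one independent filtering scan of the materialized resource list per category.
import Mathlib
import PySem

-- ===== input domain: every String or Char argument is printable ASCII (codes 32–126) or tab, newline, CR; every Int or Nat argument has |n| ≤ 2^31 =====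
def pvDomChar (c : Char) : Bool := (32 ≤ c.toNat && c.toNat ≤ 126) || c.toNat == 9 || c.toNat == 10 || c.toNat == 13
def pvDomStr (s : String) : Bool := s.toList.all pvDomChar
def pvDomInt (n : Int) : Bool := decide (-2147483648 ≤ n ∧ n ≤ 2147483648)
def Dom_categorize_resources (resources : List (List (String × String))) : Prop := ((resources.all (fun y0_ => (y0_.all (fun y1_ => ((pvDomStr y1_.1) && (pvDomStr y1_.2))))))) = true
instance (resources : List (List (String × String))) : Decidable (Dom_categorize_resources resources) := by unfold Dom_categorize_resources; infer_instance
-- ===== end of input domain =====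

-- B replaces A's single-pass dict-dispatch grouping (category_map lookup appending into
-- pre-built mutable buckets) with per-category type lists, a first-match classifier over
-- them, and one filtering scan per category (return value only; neither mutates its input).

-- ===== PORT A =====
-- A's literal category_map dict
def pvCategoryMap : PySem.Dict String String := PySem.Dict.mk
  [("aws_vpc", "networking"), ("aws_subnet", "networking"), ("aws_internet_gateway", "networking"),
   ("aws_nat_gateway", "networking"), ("aws_route_table", "networking"), ("aws_security_group", "networking"),
   ("aws_instance", "compute"), ("aws_launch_template", "compute"), ("aws_autoscaling_group", "compute"),
   ("aws_lambda_function", "compute"), ("aws_ecs_service", "compute"), ("aws_ecs_cluster", "compute"),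
   ("aws_lb", "networking"), ("aws_alb", "networking"), ("aws_elb", "networking"), ("aws_lb_target_group", "networking"),
   ("aws_db_instance", "database"), ("aws_rds_cluster", "database"), ("aws_dynamodb_table", "database"),
   ("aws_elasticache_cluster", "database"),
   ("aws_wafv2_web_acl", "security"), ("aws_waf_web_acl", "security"), ("aws_iam_role", "security"),
   ("aws_iam_policy", "security"),
   ("aws_s3_bucket", "storage"),
   ("aws_cloudwatch_log_group", "monitoring"),
   ("aws_sqs_queue", "integration"), ("aws_sns_topic", "integration")]

-- A's 'category_map.get(resource['type'], 'other')'.  resource['type'] raises KeyError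
-- when the key is absent (excluded by Pre_); there the port uses the harmless default "".
def pvKey (r : List (String × String)) : String :=
  pvCategoryMap.getD ((PySem.Dict.mk r).getD "type" "") "other"

def categorize_resources (resources : List (List (String × String))) : List (String × List (List (String × String))) :=
  let categories : PySem.Dict String (List (List (String × String))) := PySem.Dict.mk
    [("networking", []), ("compute", []), ("database", []), ("security", []),
     ("storage", []), ("monitoring", []), ("integration", []), ("other", [])]
  let final := resources.foldl (fun cats resource =>
      let category := pvKey resource
      cats.modify category [] (· ++ [resource])) categories
  final.items

-- ===== PORT B =====
-- B's TYPES table: the category name with the tuple of resource types belonging to it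
def pvTypes : List (String × List String) :=
  [("networking", ["aws_vpc", "aws_subnet", "aws_internet_gateway", "aws_nat_gateway",
                   "aws_route_table", "aws_security_group", "aws_lb", "aws_alb", "aws_elb",
                   "aws_lb_target_group"]),
   ("compute", ["aws_instance", "aws_launch_template", "aws_autoscaling_group",
                "aws_lambda_function", "aws_ecs_service", "aws_ecs_cluster"]),
   ("database", ["aws_db_instance", "aws_rds_cluster", "aws_dynamodb_table",
                 "aws_elasticache_cluster"]),
   ("security", ["aws_wafv2_web_acl", "aws_waf_web_acl", "aws_iam_role", "aws_iam_policy"]),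
   ("storage", ["aws_s3_bucket"]),
   ("monitoring", ["aws_cloudwatch_log_group"]),
   ("integration", ["aws_sqs_queue", "aws_sns_topic"])]

-- B's classify(t): first-match scan of the TYPES table, default 'other'
def pvClassifyLoop (table : List (String × List String)) (t : String) : String :=
  match table with
  | [] => "other"
  | (cat, types) :: rest => if types.contains t then cat else pvClassifyLoop rest t

-- B's classify(r['type']) (same "" default outside Pre_ as A's port)
def pvClassifyRes (r : List (String × String)) : String :=
  pvClassifyLoop pvTypes ((PySem.Dict.mk r).getD "type" "")

def categorize_resources_alt (resources : List (List (String × String))) : List (String × List (List (String × String))) :=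
  let items := resources
  (pvTypes.map (fun p => (p.1, items.filter (fun r => pvClassifyRes r == p.1))))
    ++ [("other", items.filter (fun r => pvClassifyRes r == "other"))]

-- ===== PRECONDITION & SPEC =====
-- Pre_ excludes resources without a 'type' key, on which A raises KeyError.
def Pre_categorize_resources (resources : List (List (String × String))) : Prop :=
  ∀ r ∈ resources, "type" ∈ r.map Prod.fst
instance (resources : List (List (String × String))) : Decidable (Pre_categorize_resources resources) := by unfold Pre_categorize_resources; infer_instance

def pvWitness_categorize_resources : (List (List (String × String))) :=
  [[("type", "aws_vpc"), ("name", "main")], [("type", "custom_thing")]]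

def Spec_categorize_resources (resources : List (List (String × String))) (out : List (String × List (List (String × String)))) : Prop := out = categorize_resources_alt resources
instance (resources : List (List (String × String))) (out : List (String × List (List (String × String)))) : Decidable (Spec_categorize_resources resources out) := by unfold Spec_categorize_resources; infer_instance

-- ===== CLAIM =====
def Claim_equal_categorize_resources : Prop := ∀ (resources : List (List (String × String))), Dom_categorize_resources resources → Pre_categorize_resources resources → Spec_categorize_resources resources (categorize_resources resources)

-- ===== LEMMAS AND PROOFS =====

def pvNames : List String :=
  ["networking", "compute", "database", "security", "storage", "monitoring", "integration", "other"]

-- helper lemmas about B's first-match classifier loop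
lemma pvClassifyLoop_other (table : List (String × List String)) (t : String)
    (h : ∀ p ∈ table, p.2.contains t = false) : pvClassifyLoop table t = "other" := by
  induction table with
  | nil => rfl
  | cons p rest ih =>
    obtain ⟨c, ts⟩ := p
    simp only [pvClassifyLoop]
    rw [h (c, ts) (List.mem_cons_self)]
    simp only [Bool.false_eq_true, if_false]
    exact ih (fun q hq => h q (List.mem_cons_of_mem _ hq))

lemma pvClassifyLoop_mem (table : List (String × List String)) (t : String) :
    pvClassifyLoop table t ∈ "other" :: table.map Prod.fst := by
  induction table with
  | nil => simp [pvClassifyLoop]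
  | cons p rest ih =>
    obtain ⟨c, ts⟩ := p
    simp only [pvClassifyLoop]
    split
    · simp
    · rcases List.mem_cons.mp ih with h | h
      · simp [h]
      · simp [h]

-- B's classifier agrees with A's dict lookup on every string
lemma pvClassify_eq (t : String) :
    pvClassifyLoop pvTypes t = pvCategoryMap.getD t "other" := by
  rw [PySem.Dict.getD_eq_get?_getD]
  cases h : pvCategoryMap.get? t with
  | some v =>
    have hv := PySem.Dict.mem_items_of_get?_eq_some (d := pvCategoryMap) h
    simp [pvCategoryMap] at hv
    rcases hv with (⟨rfl, rfl⟩|⟨rfl, rfl⟩|⟨rfl, rfl⟩|⟨rfl, rfl⟩|⟨rfl, rfl⟩|⟨rfl, rfl⟩|⟨rfl, rfl⟩|⟨rfl, rfl⟩|⟨rfl, rfl⟩|⟨rfl, rfl⟩|⟨rfl, rfl⟩|⟨rfl, rfl⟩|⟨rfl, rfl⟩|⟨rfl, rfl⟩|⟨rfl, rfl⟩|⟨rfl, rfl⟩|⟨rfl, rfl⟩|⟨rfl, rfl⟩|⟨rfl, rfl⟩|⟨rfl, rfl⟩|⟨rfl, rfl⟩|⟨rfl, rfl⟩|⟨rfl,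 rfl⟩|⟨rfl, rfl⟩|⟨rfl, rfl⟩|⟨rfl, rfl⟩|⟨rfl, rfl⟩|⟨rfl, rfl⟩) <;> decide
  | none =>
    have hk : t ∉ pvCategoryMap.keys := by
      rw [PySem.Dict.get?_eq_none_iff_not_mem_keys] at h; exact h
    simp [pvCategoryMap, PySem.Dict.keys] at hk
    obtain ⟨h1,h2,h3,h4,h5,h6,h7,h8,h9,h10,h11,h12,h13,h14,h15,h16,h17,h18,h19,h20,h21,h22,h23,h24,h25,h26,h27,h28⟩ := hk
    refine pvClassifyLoop_other pvTypes t ?_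
    intro p hp
    simp [pvTypes] at hp
    rcases hp with rfl|rfl|rfl|rfl|rfl|rfl|rfl <;>
      simp [h1, h2, h3, h4, h5, h6, h7, h8, h9, h10, h11, h12, h13, h14,
            h15, h16, h17, h18, h19, h20, h21, h22, h23, h24, h25, h26, h27, h28]

lemma pvClassifyRes_eq (r : List (String × String)) : pvClassifyRes r = pvKey r := by
  unfold pvClassifyRes pvKey
  exact pvClassify_eq _

lemma pvKey_mem (r : List (String × String)) : pvKey r ∈ pvNames := by
  rw [← pvClassifyRes_eq]
  unfold pvClassifyRes
  have h := pvClassifyLoop_mem pvTypes ((PySem.Dict.mk r).getD "type" "")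
  generalize hx : pvClassifyLoop pvTypes ((PySem.Dict.mk r).getD "type" "") = x at h ⊢
  simp [pvTypes] at h
  simp [pvNames]
  tauto

def pvD0 : PySem.Dict String (List (List (String × String))) := PySem.Dict.mk
  [("networking", []), ("compute", []), ("database", []), ("security", []),
   ("storage", []), ("monitoring", []), ("integration", []), ("other", [])]

lemma pvD0_getD (c : String) : pvD0.getD c [] = [] := by
  rw [PySem.Dict.getD_eq_get?_getD]
  cases h : pvD0.get? c with
  | none => rfl
  | some v =>
    have hv := PySem.Dict.mem_items_of_get?_eq_some (d := pvD0) h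
    simp [pvD0] at hv
    rcases hv with (⟨-, rfl⟩|⟨-, rfl⟩|⟨-, rfl⟩|⟨-, rfl⟩|⟨-, rfl⟩|⟨-, rfl⟩|⟨-, rfl⟩|⟨-, rfl⟩) <;> rfl

lemma pvFinal_keys (resources : List (List (String × String))) :
    (resources.foldl (fun cats r => cats.modify (pvKey r) [] (· ++ [r])) pvD0).keys = pvNames := by
  rw [PySem.Dict.keys_foldl_modify_key]
  have h0 : pvD0.keys = pvNames := rfl
  rw [h0, PySem.Set.update_eq_append_filter]
  have : (PySem.Set.ofList (resources.map pvKey)).filter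
      (fun y => !(PySem.Set.contains pvNames y)) = [] := by
    rw [List.filter_eq_nil_iff]
    intro a ha
    have : a ∈ resources.map pvKey := (PySem.Set.mem_ofList _ _).mp ha
    rcases List.mem_map.mp this with ⟨r, -, rfl⟩
    simp [pvKey_mem r]
  rw [this, List.append_nil]

lemma pvFinal_getD (resources : List (List (String × String))) (c : String) :
    (resources.foldl (fun cats r => cats.modify (pvKey r) [] (· ++ [r])) pvD0).getD c []
      = resources.filter (fun r => pvKey r == c) := by
  have h1 : resources.foldl (fun cats r => cats.modify (pvKey r) [] (· ++ [r])) pvD0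
      = (resources.map (fun r => (pvKey r, r))).foldl
          (fun d p => d.modify p.1 [] (· ++ [p.2])) pvD0 := by rw [List.foldl_map]
  rw [h1, PySem.Dict.getD_foldl_modify_append, pvD0_getD, List.nil_append,
    List.filter_map, List.map_map]
  simp [Function.comp_def]

lemma pvAlt_eq_names_map (resources : List (List (String × String))) :
    categorize_resources_alt resources
      = pvNames.map (fun c => (c, resources.filter (fun r => pvKey r == c))) := by
  unfold categorize_resources_alt
  have hfilter : ∀ c, resources.filter (fun r => pvClassifyRes r == c)
      = resources.filter (fun r => pvKey r == c) := by
    intro c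
    exact List.filter_congr (fun r _ => by rw [pvClassifyRes_eq])
  simp only [pvTypes, pvNames, List.map_cons, List.map_nil, hfilter]
  rfl

-- ===== VERDICT =====
theorem categorize_resources_spec : Claim_equal_categorize_resources := by
  intro resources _ _
  unfold Spec_categorize_resources categorize_resources
  rw [pvAlt_eq_names_map]
  have hnd : (resources.foldl (fun cats r => cats.modify (pvKey r) [] (· ++ [r])) pvD0).keys.Nodup := by
    rw [pvFinal_keys]; decide
  rw [show (PySem.Dict.mk
    [("networking", []), ("compute", []), ("database", []), ("security", []),
     ("storage", []), ("monitoring", []), ("integration", []), ("other", [])]) = pvD0 from rfl]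
  rw [PySem.Dict.items_eq_map_keys _ hnd ([] : List (List (String × String))), pvFinal_keys]
  exact List.map_congr_left (fun c _ => by rw [pvFinal_getD])
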